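-- pv_equiv track=rewrite | github.com/mohantyk/bioinformatics | week2.py | approx_pattern_match
-- ===== SOURCE A (Python) =====
-- def hamming(g1, g2):
--     if len(g1) != len(g2):
--         raise ValueError
--
--     count = 0
--     for n1, n2 in zip(g1, g2):
--         count += (n1 != n2)
--     return count
--
-- def approx_pattern_match(pattern, text, d):
--     k = len(pattern)
--     n = len(text)
--     indices = []
--     for idx in range(n):
--         if idx + k > n: break
--         window = text[idx:idx+k]
--         if hamming(pattern, window) <= d:
--             indices.append(idx)
--
--     return indices
-- ===== SOURCE B (Python) =====
-- def approx_pattern_match(pattern, text, d):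
--     k = len(pattern)
--     n = len(text)
--     num = min(n, max(0, n - k + 1))  # windows idx with idx < n and idx + k <= n
--     counts = [0] * num
--     for j, pj in enumerate(pattern):
--         counts = [c + (text[i + j] != pj) for i, c in enumerate(counts)]
--     return [i for i, c in enumerate(counts) if c <= d]
-- ===== Notes on version B (the rewrite author's own statement) =====
-- stated objective: alternative
-- what changed: Replaces A's per-window scan (a fresh Hamming-distance pass over each slice) by a column-first algorithm: an explicit per-window mismatch-count table updated one pattern position at a time, then filtered once, with the window count derived in closed form instead of a break inside the scan.
import Mathlib
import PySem

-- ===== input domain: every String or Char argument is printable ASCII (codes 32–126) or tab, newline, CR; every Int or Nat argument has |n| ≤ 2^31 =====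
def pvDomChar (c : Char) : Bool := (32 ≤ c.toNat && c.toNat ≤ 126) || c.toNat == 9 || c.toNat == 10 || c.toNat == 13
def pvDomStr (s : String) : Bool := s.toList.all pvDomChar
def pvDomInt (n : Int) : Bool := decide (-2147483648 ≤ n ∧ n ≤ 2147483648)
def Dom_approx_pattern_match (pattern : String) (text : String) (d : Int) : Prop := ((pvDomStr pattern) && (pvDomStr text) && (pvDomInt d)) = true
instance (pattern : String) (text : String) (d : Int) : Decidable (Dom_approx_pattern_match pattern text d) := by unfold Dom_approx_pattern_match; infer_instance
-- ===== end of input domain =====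

-- B replaces A's per-window hamming-distance scan by a column-first mismatch-count table; objective: alternative (same O(n·k) cost, different traversal).

-- ===== PORT A =====
-- hamming(g1, g2): A's length check raises ValueError only on unequal lengths; the sole
-- caller always passes a window of length len(pattern), so the counting branch below is
-- the whole observed behaviour (exact on all calls made by approx_pattern_match).
def pvHamming (g1 g2 : List Char) : Int :=
  (g1.zip g2).foldl (fun count q => count + (if q.1 ≠ q.2 then (1 : Int) else 0)) 0

-- the 'for idx in range(n): if idx + k > n: break; …' loop, step for step
def pvGoA (p t : List Char) (d : Int) (k n : Nat) (idx : Nat) (indices : List Int) : List Int :=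
  if idx < n then
    if idx + k > n then indices
    else
      let window := PySem.List.slice t (some (idx : Int)) (some ((idx : Int) + (k : Int)))
      pvGoA p t d k n (idx + 1)
        (if pvHamming p window ≤ d then indices ++ [(idx : Int)] else indices)
  else indices
termination_by n - idx

def approx_pattern_match (pattern : String) (text : String) (d : Int) : List Int :=
  let k := pattern.toList.length
  let n := text.toList.length
  pvGoA pattern.toList text.toList d k n 0 []

-- ===== PORT B =====
-- num = min(n, max(0, n - k + 1)) computed in Int exactly as Python does
def pvNumOf (p t : List Char) : Nat :=
  (min (t.length : Int) (max 0 ((t.length : Int) - (p.length : Int) + 1))).toNat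

-- one column pass: counts = [c + (text[i + j] != pj) for i, c in enumerate(counts)]
-- (the index i + j is always in range on every call, so pyGetD's default ' ' is never returned)
def pvColStep (t : List Char) (counts : List Int) (jp : Int × Char) : List Int :=
  (PySem.List.enumerate counts).map
    (fun ic => ic.2 + (if PySem.List.pyGetD t (ic.1 + jp.1) ' ' ≠ jp.2 then (1 : Int) else 0))

def approx_pattern_match_alt (pattern : String) (text : String) (d : Int) : List Int :=
  let num := pvNumOf pattern.toList text.toList
  let counts := (PySem.List.enumerate pattern.toList).foldl (pvColStep text.toList)
    (List.replicate num (0 : Int))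
  ((PySem.List.enumerate counts).filter (fun ic => ic.2 ≤ d)).map (·.1)

-- ===== PRECONDITION & SPEC =====
def Spec_approx_pattern_match (pattern : String) (text : String) (d : Int) (out : List Int) : Prop := out = approx_pattern_match_alt pattern text d
instance (pattern : String) (text : String) (d : Int) (out : List Int) : Decidable (Spec_approx_pattern_match pattern text d out) := by unfold Spec_approx_pattern_match; infer_instance

-- ===== CLAIM (what is proved, stated in full; the proofs are below) =====
def Claim_equal_approx_pattern_match : Prop := ∀ (pattern : String) (text : String) (d : Int), Dom_approx_pattern_match pattern text d → Spec_approx_pattern_match pattern text d (approx_pattern_match pattern text d)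

-- ===== LEMMAS AND PROOFS =====

-- per-window mismatch count exactly as A computes it
def pvMis (p t : List Char) (i : Nat) : Int :=
  pvHamming p (PySem.List.slice t (some (i : Int)) (some ((i : Int) + (p.length : Int))))

lemma pvNum_iff (p t : List Char) (idx : Nat) :
    (idx < t.length ∧ idx + p.length ≤ t.length) ↔ idx < pvNumOf p t := by
  unfold pvNumOf; omega

lemma goA_eq (p t : List Char) (d : Int) :
    ∀ (m idx : Nat), pvNumOf p t - idx = m → ∀ acc : List Int,
    pvGoA p t d p.length t.length idx acc =
      acc ++ ((List.range' idx m).filter (fun i => decide (pvMis p t i ≤ d))).map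
        (fun i => ((i : Nat) : Int)) := by
  intro m
  induction m with
  | zero =>
    intro idx h acc
    have hn : ¬ (idx < t.length ∧ idx + p.length ≤ t.length) := by
      rw [pvNum_iff p t idx]; omega
    simp only [List.range'_zero, List.filter_nil, List.map_nil, List.append_nil]
    by_cases h1 : idx < t.length
    · have h2 : idx + p.length > t.length := by omega
      rw [pvGoA, if_pos h1, if_pos h2]
    · rw [pvGoA, if_neg h1]
  | succ m ih =>
    intro idx h acc
    have hc : idx < t.length ∧ idx + p.length ≤ t.length := by
      rw [pvNum_iff p t idx]; omega
    rw [pvGoA, if_pos hc.1, if_neg (by omega)]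
    rw [ih (idx + 1) (by omega)]
    rw [List.range'_succ, List.filter_cons]
    simp only [pvMis, decide_eq_true_eq]
    by_cases hm : pvHamming p (PySem.List.slice t (some (idx : Int)) (some ((idx : Int) + (p.length : Int)))) ≤ d
    · rw [if_pos hm, if_pos hm]
      simp [List.append_assoc]
    · rw [if_neg hm, if_neg hm]

-- the column pass on a table (range num).map f adds the j-th column's indicators pointwise
lemma colStep_eq (t : List Char) (num : Nat) (f : Nat → Int) (jp : Int × Char) :
    pvColStep t ((List.range num).map f) jp =
      (List.range num).map
        (fun i => f i + (if PySem.List.pyGetD t ((i : Int) + jp.1) ' ' ≠ jp.2 then (1 : Int) else 0)) := by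
  apply List.ext_getElem
  · simp [pvColStep, PySem.List.length_enumerate]
  · intro i h1 h2
    simp only [pvColStep, List.getElem_map, PySem.List.getElem_enumerate]
    simp at h1 ⊢

-- folding all columns
lemma colFold_eq (t : List Char) (num : Nat) :
    ∀ (L : List (Int × Char)) (f : Nat → Int),
    L.foldl (pvColStep t) ((List.range num).map f) =
      (List.range num).map
        (fun i => f i + (L.map
          (fun jp => if PySem.List.pyGetD t ((i : Int) + jp.1) ' ' ≠ jp.2 then (1 : Int) else 0)).sum) := by
  intro L
  induction L with
  | nil => intro f; simp
  | cons jp L ih =>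
    intro f
    simp only [List.foldl_cons, colStep_eq]
    rw [ih]
    apply List.map_congr_left
    intro i _
    simp [add_assoc]

-- extracting the qualifying indices from the final table
lemma enumFilter_eq (d : Int) (g : Nat → Int) :
    ∀ (m a : Nat),
    ((PySem.List.enumerate ((List.range' a m).map g) (a : Int)).filter
        (fun ic => decide (ic.2 ≤ d))).map (·.1) =
      ((List.range' a m).filter (fun i => decide (g i ≤ d))).map (fun i => ((i : Nat) : Int)) := by
  intro m
  induction m with
  | zero => intro a; simp [PySem.List.enumerate_nil]
  | succ m ih =>
    intro a
    rw [List.range'_succ]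
    simp only [List.map_cons, PySem.List.enumerate_cons, List.filter_cons]
    have hcast : ((a : Int) + 1) = (((a + 1 : Nat)) : Int) := by push_cast; ring
    rw [hcast]
    split_ifs with hg
    · simp only [List.map_cons]
      rw [ih (a + 1)]
    · exact ih (a + 1)

-- the window mismatch sum A computes equals the column sum B accumulates
lemma mis_eq_sum (p t : List Char) (i : Nat) (hik : i + p.length ≤ t.length) :
    pvMis p t i =
      ((PySem.List.enumerate p).map
        (fun jp => if PySem.List.pyGetD t ((i : Int) + jp.1) ' ' ≠ jp.2 then (1 : Int) else 0)).sum := by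
  unfold pvMis pvHamming
  rw [PySem.List.foldl_add (g := fun q : Char × Char => if q.1 ≠ q.2 then (1 : Int) else 0)]
  rw [zero_add]
  congr 1
  rw [PySem.List.slice_natCast_add]
  apply List.ext_getElem
  · simp [PySem.List.length_enumerate]; omega
  · intro j h1 h2
    have hj : j < p.length := by simp at h1; omega
    have hij : i + j < t.length := by omega
    simp only [List.getElem_map, List.getElem_zip, PySem.List.getElem_enumerate,
      List.getElem_take, List.getElem_drop]
    have : PySem.List.pyGetD t ((i : Int) + ((0 : Int) + (j : Int))) ' ' = t[i + j] := by
      have : ((i : Int) + ((0 : Int) + (j : Int))) = ((i + j : Nat) : Int) := by push_cast; ring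
      rw [this, PySem.List.pyGetD_natCast, List.getD_eq_getElem _ _ hij]
    rw [this]
    rcases eq_or_ne p[j] t[i + j] with he | he
    · simp [he]
    · simp [he, Ne.symm he]

-- ===== VERDICT (by name: the statement is the Claim_ definition above) =====
theorem approx_pattern_match_spec : Claim_equal_approx_pattern_match := by
  intro pattern text d _
  show approx_pattern_match pattern text d = approx_pattern_match_alt pattern text d
  simp only [approx_pattern_match, approx_pattern_match_alt]
  rw [goA_eq pattern.toList text.toList d (pvNumOf pattern.toList text.toList) 0 (by omega)]
  have hrepl : List.replicate (pvNumOf pattern.toList text.toList) (0 : Int) =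
      (List.range (pvNumOf pattern.toList text.toList)).map (fun _ => (0 : Int)) := by
    simp [List.map_const']
  rw [hrepl, colFold_eq]
  rw [List.range_eq_range', List.nil_append]
  have h0 := enumFilter_eq d
    (fun i => (0 : Int) + ((PySem.List.enumerate pattern.toList).map
      (fun jp => if PySem.List.pyGetD text.toList ((i : Int) + jp.1) ' ' ≠ jp.2 then (1 : Int) else 0)).sum)
    (pvNumOf pattern.toList text.toList) 0
  simp only [Nat.cast_zero] at h0
  rw [h0]
  have hfil : ∀ i ∈ List.range' 0 (pvNumOf pattern.toList text.toList),
      decide (pvMis pattern.toList text.toList i ≤ d) =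
      decide ((0 : Int) + ((PySem.List.enumerate pattern.toList).map
        (fun jp => if PySem.List.pyGetD text.toList ((i : Int) + jp.1) ' ' ≠ jp.2 then (1 : Int) else 0)).sum ≤ d) := by
    intro i hi
    have hi' : i < pvNumOf pattern.toList text.toList := by
      have := List.mem_range'_1.mp hi; omega
    have hik : i + pattern.toList.length ≤ text.toList.length :=
      ((pvNum_iff pattern.toList text.toList i).mpr hi').2
    rw [zero_add, mis_eq_sum pattern.toList text.toList i hik]
  rw [List.filter_congr hfil]
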